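-- pv_equiv track=rewrite | github.com/yashmahi88/AI-Build-Prediction | feedbacks.py | extract_success_failure_patterns
-- ===== SOURCE A (Python) =====
-- def extract_success_failure_patterns(content):
--     """Extract what leads to success vs failure from documentation"""
--     patterns = {
--         'success_indicators': [],
--         'failure_indicators': [],
--         'best_practices': []
--     }
--
--     lines = content.split('\n')
--     full_text = content.lower()
--
--     # Success patterns
--     if any(term in full_text for term in ['successful', 'complete', 'performance', 'optimize']):
--         for line in lines:
--             if any(term in line.lower() for term in ['successful', 'performance', 'speed', 'optimize']):
--                 patterns['success_indicators'].append(line.strip())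
--
--     # Failure patterns
--     if any(term in full_text for term in ['fail', 'error', 'issue', 'problem', 'troubleshoot']):
--         for line in lines:
--             if any(term in line.lower() for term in ['fail', 'error', 'issue', 'problem']):
--                 patterns['failure_indicators'].append(line.strip())
--
--     # Best practices
--     if any(term in full_text for term in ['recommend', 'should', 'best', 'consider']):
--         for line in lines:
--             if any(term in line.lower() for term in ['recommend', 'should', 'consider', 'best']):
--                 patterns['best_practices'].append(line.strip())
--
--     return patterns
-- ===== SOURCE B (Python) =====
-- def extract_success_failure_patterns(content):
--     """Extract what leads to success vs failure from documentation"""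
--     full_text = content.lower()
--     gs = any(t in full_text for t in ['successful', 'complete', 'performance', 'optimize'])
--     gf = any(t in full_text for t in ['fail', 'error', 'issue', 'problem', 'troubleshoot'])
--     gb = any(t in full_text for t in ['recommend', 'should', 'best', 'consider'])
--     success, failure, best = [], [], []
--     for line in content.split('\n'):
--         lower = line.lower()
--         if gs and any(t in lower for t in ['successful', 'performance', 'speed', 'optimize']):
--             success.append(line.strip())
--         if gf and any(t in lower for t in ['fail', 'error', 'issue', 'problem']):
--             failure.append(line.strip())
--         if gb and any(t in lower for t in ['recommend', 'should', 'consider', 'best']):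
--             best.append(line.strip())
--     return {
--         'success_indicators': success,
--         'failure_indicators': failure,
--         'best_practices': best
--     }
-- ===== Notes on version B (the rewrite author's own statement) =====
-- stated objective: alternative
-- what changed: Computes the three outer guard booleans once up front and replaces A's three separate guarded passes over the lines (each re-lowering every line) with a single fused pass that lowers each line once and appends to the three lists simultaneously.
import Mathlib
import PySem

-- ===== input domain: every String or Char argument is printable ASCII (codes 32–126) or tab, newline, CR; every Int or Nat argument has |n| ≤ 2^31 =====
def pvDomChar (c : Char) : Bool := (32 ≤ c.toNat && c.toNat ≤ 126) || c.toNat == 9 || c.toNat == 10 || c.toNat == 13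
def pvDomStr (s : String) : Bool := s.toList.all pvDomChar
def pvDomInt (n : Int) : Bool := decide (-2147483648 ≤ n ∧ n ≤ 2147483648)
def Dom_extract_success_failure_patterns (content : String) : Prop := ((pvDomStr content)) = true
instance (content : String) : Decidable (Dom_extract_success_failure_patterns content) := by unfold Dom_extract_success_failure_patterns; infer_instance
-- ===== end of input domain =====

-- B computes the three outer guards once and fuses A's three guarded line scans into a single pass that lowers each line once (alternative decomposition, same asymptotic cost).


-- ===== PORT A =====
-- any(term in text for term in terms)
def pvAnyInA (terms : List String) (text : String) : Bool :=
  terms.any (fun t => PySem.Str.isIn t text)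

def extract_success_failure_patterns (content : String) : List (String × List String) :=
  let lines : List String := (PySem.Str.split? content "\n").getD []  -- sep "\n" ≠ "", so split? is some
  let full_text := PySem.Str.lower content
  let succ :=
    if pvAnyInA ["successful", "complete", "performance", "optimize"] full_text then
      lines.foldl (fun acc line =>
        if pvAnyInA ["successful", "performance", "speed", "optimize"] (PySem.Str.lower line) then
          acc ++ [PySem.Str.strip line] else acc) []
    else []
  let fail :=
    if pvAnyInA ["fail", "error", "issue", "problem", "troubleshoot"] full_text then
      lines.foldl (fun acc line =>
        if pvAnyInA ["fail", "error", "issue", "problem"] (PySem.Str.lower line) then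
          acc ++ [PySem.Str.strip line] else acc) []
    else []
  let best :=
    if pvAnyInA ["recommend", "should", "best", "consider"] full_text then
      lines.foldl (fun acc line =>
        if pvAnyInA ["recommend", "should", "consider", "best"] (PySem.Str.lower line) then
          acc ++ [PySem.Str.strip line] else acc) []
    else []
  [("success_indicators", succ), ("failure_indicators", fail), ("best_practices", best)]

-- ===== PORT B =====
def extract_success_failure_patterns_alt (content : String) : List (String × List String) :=
  let full_text := PySem.Str.lower content
  let gs := ["successful", "complete", "performance", "optimize"].any (fun t => PySem.Str.isIn t full_text)
  let gf :=  ["fail", "error", "issue", "problem", "troubleshoot"].any (fun t => PySem.Str.isIn t full_text)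
  let gb :=  ["recommend", "should", "best", "consider"].any (fun t => PySem.Str.isIn t full_text)
  let r := ((PySem.Str.split? content "\n").getD []).foldl
    (fun (acc : List String × List String × List String) line =>
      let lower := PySem.Str.lower line
      let acc1 := if gs &&  ["successful", "performance", "speed", "optimize"].any (fun t => PySem.Str.isIn t lower) then
          (acc.1 ++ [PySem.Str.strip line], acc.2.1, acc.2.2) else acc
      let acc2 := if gf &&  ["fail", "error", "issue", "problem"].any (fun t => PySem.Str.isIn t lower) then
          (acc1.1, acc1.2.1 ++ [PySem.Str.strip line], acc1.2.2) else acc1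
      if gb &&  ["recommend", "should", "consider", "best"].any (fun t => PySem.Str.isIn t lower) then
          (acc2.1, acc2.2.1, acc2.2.2 ++ [PySem.Str.strip line]) else acc2)
    ([], [], [])
  [("success_indicators", r.1), ("failure_indicators", r.2.1), ("best_practices", r.2.2)]

-- ===== PRECONDITION & SPEC =====
def Spec_extract_success_failure_patterns (content : String) (out : List (String × List String)) : Prop := out = extract_success_failure_patterns_alt content
instance (content : String) (out : List (String × List String)) : Decidable (Spec_extract_success_failure_patterns content out) := by unfold Spec_extract_success_failure_patterns; infer_instance

-- ===== CLAIM (what is proved, stated in full; the proofs are below) =====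
def Claim_equal_extract_success_failure_patterns : Prop := ∀ (content : String), Dom_extract_success_failure_patterns content → Spec_extract_success_failure_patterns content (extract_success_failure_patterns content)

-- ===== LEMMAS AND PROOFS =====

-- the fused triple fold equals the three independent folds
theorem pv_fused_fold (gs gf gb : Bool) (ps pf pb : String → Bool) (f : String → String)
    (lines : List String) (a b c : List String) :
    lines.foldl
      (fun (acc : List String × List String × List String) line =>
        let acc1 := if gs && ps line then (acc.1 ++ [f line], acc.2.1, acc.2.2) else acc
        let acc2 := if gf && pf line then (acc1.1, acc1.2.1 ++ [f line], acc1.2.2) else acc1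
        if gb && pb line then (acc2.1, acc2.2.1, acc2.2.2 ++ [f line]) else acc2)
      (a, b, c)
    = (lines.foldl (fun x line => if gs && ps line then x ++ [f line] else x) a,
       lines.foldl (fun x line => if gf && pf line then x ++ [f line] else x) b,
       lines.foldl (fun x line => if gb && pb line then x ++ [f line] else x) c) := by
  induction lines generalizing a b c with
  | nil => rfl
  | cons l ls ih => simp only [List.foldl_cons]; split_ifs <;> simp_all

-- ===== VERDICT (by name: the statement is the Claim_ definition above) =====
theorem extract_success_failure_patterns_spec : Claim_equal_extract_success_failure_patterns := by
  intro content _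
  unfold Spec_extract_success_failure_patterns
  unfold extract_success_failure_patterns extract_success_failure_patterns_alt pvAnyInA
  simp only []
  rw [pv_fused_fold]
  cases hs : (["successful", "complete", "performance", "optimize"].any
      (fun t => PySem.Str.isIn t (PySem.Str.lower content))) <;>
  cases hf : (["fail", "error", "issue", "problem", "troubleshoot"].any
      (fun t => PySem.Str.isIn t (PySem.Str.lower content))) <;>
  cases hb : (["recommend", "should", "best", "consider"].any
      (fun t => PySem.Str.isIn t (PySem.Str.lower content))) <;>
  simp
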